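-- pv_equiv track=rewrite | github.com/Monalisa98927/Beat-tracking-of-performance-midi | musicnet_data_prepare.py | absolute_onset_beat_to_relative_onset_beat
-- ===== SOURCE A (Python) =====
-- pad_length = 400 #350 #218
--
-- def absolute_onset_beat_to_relative_onset_beat(nmat):
--     """
--     Converts absolute onset beat to relative onset beat.
--     """
--
--     current_start_beat = 0
--     nmat_ = []
--     for i, nmat_row in enumerate(nmat):
--         if i % pad_length == 0:
--             current_start_beat = nmat[i][3]
--         if not (nmat[i][0] == 0 and nmat[i][1] == 0):
--             nmat[i][3] -= current_start_beat
--         nmat_.append(nmat[i])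
--
--     return nmat_
-- ===== SOURCE B (Python) =====
-- pad_length = 400
--
-- def absolute_onset_beat_to_relative_onset_beat(nmat):
--     """
--     Converts absolute onset beat to relative onset beat.
--     Nested pass: slice the rows into consecutive pad_length blocks, read each
--     block's start beat once, then subtract it inside the block.
--     (Mutates the rows in place, like the original.)
--     """
--     nmat_ = []
--     for b in range(0, len(nmat), pad_length):
--         block = nmat[b:b + pad_length]
--         start = block[0][3]
--         for row in block:
--             if not (row[0] == 0 and row[1] == 0):
--                 row[3] -= start
--             nmat_.append(row)
--     return nmat_
-- ===== Notes on version B (the rewrite author's own statement) =====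
-- stated objective: alternative
-- what changed: Replaces the flat enumerate loop with a modulo-counter and carried start-beat state by an explicit nested pass: slice the rows into consecutive pad_length blocks, read each block's first onset once, and subtract it inside the block.
import Mathlib
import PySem

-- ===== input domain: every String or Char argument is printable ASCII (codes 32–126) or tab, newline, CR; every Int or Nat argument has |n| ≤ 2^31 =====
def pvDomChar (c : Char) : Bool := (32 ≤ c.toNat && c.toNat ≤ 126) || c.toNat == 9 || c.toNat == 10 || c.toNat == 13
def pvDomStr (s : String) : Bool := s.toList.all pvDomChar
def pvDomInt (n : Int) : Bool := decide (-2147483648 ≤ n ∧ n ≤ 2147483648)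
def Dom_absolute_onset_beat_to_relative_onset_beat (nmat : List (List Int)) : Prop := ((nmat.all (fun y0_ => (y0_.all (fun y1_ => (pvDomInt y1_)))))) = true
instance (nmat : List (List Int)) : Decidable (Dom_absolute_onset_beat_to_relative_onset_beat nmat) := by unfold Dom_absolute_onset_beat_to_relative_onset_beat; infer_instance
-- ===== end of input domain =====

-- B replaces A's flat loop with a modulo counter by an explicit nested pass over
-- pad_length-sized blocks (same return value; both mutate the rows in place in Python,
-- the equivalence proved here is about the returned value).


-- ===== PORT A =====
-- A: for i, row in enumerate(nmat): at i % 400 == 0 re-read current_start_beat from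
-- nmat[i][3]; subtract it from nmat[i][3] unless row[0]==0 and row[1]==0; append the row.
-- Out-of-range element reads (Python IndexError) become `.getD 0` here; exactly those
-- inputs are excluded by Pre_ below.
def pvGoA (i : Nat) (start : Int) : List (List Int) → List (List Int)
  | [] => []
  | row :: rest =>
    let start' := if i % 400 = 0 then ((PySem.List.pyGet? row 3).getD 0) else start
    let row' := if (PySem.List.pyGet? row 0).getD 0 = 0 ∧ (PySem.List.pyGet? row 1).getD 0 = 0
                then row
                else row.set 3 (((PySem.List.pyGet? row 3).getD 0) - start')
    row' :: pvGoA (i + 1) start' rest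

def absolute_onset_beat_to_relative_onset_beat (nmat : List (List Int)) : List (List Int) :=
  pvGoA 0 0 nmat

-- ===== PORT B =====
-- B: chunk the rows into consecutive blocks of 400; per block read start = block[0][3]
-- once, then map the subtraction over the block's rows.
def pvProcRow (start : Int) (row : List Int) : List Int :=
  if (PySem.List.pyGet? row 0).getD 0 = 0 ∧ (PySem.List.pyGet? row 1).getD 0 = 0
  then row
  else row.set 3 (((PySem.List.pyGet? row 3).getD 0) - start)

def pvGoB (l : List (List Int)) : List (List Int) :=
  match l with
  | [] => []
  | row :: rest =>
    let block := (row :: rest).take 400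
    let start := (PySem.List.pyGet? row 3).getD 0
    block.map (pvProcRow start) ++ pvGoB ((row :: rest).drop 400)
termination_by l.length
decreasing_by simp

def absolute_onset_beat_to_relative_onset_beat_alt (nmat : List (List Int)) : List (List Int) :=
  pvGoB nmat

-- ===== PRECONDITION & SPEC =====
-- Pre_ excludes exactly the inputs on which the Python A raises IndexError: a row at a
-- block-start index (i % 400 == 0) must have length ≥ 4, and any other row must either
-- start with two zeros or have length ≥ 4.
def Pre_absolute_onset_beat_to_relative_onset_beat (nmat : List (List Int)) : Prop :=
  ∀ p ∈ nmat.zipIdx,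
    if p.2 % 400 = 0 then 4 ≤ p.1.length
    else if PySem.List.pyGet? p.1 0 = some 0 ∧ PySem.List.pyGet? p.1 1 = some 0 then True
    else 4 ≤ p.1.length
instance (nmat : List (List Int)) : Decidable (Pre_absolute_onset_beat_to_relative_onset_beat nmat) := by unfold Pre_absolute_onset_beat_to_relative_onset_beat; infer_instance

def pvWitness_absolute_onset_beat_to_relative_onset_beat : List (List Int) :=
  [[1, 2, 3, 4], [0, 0], [5, 0, 7, 9]]

def Spec_absolute_onset_beat_to_relative_onset_beat (nmat : List (List Int)) (out : List (List Int)) : Prop := out = absolute_onset_beat_to_relative_onset_beat_alt nmat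
instance (nmat : List (List Int)) (out : List (List Int)) : Decidable (Spec_absolute_onset_beat_to_relative_onset_beat nmat out) := by unfold Spec_absolute_onset_beat_to_relative_onset_beat; infer_instance

-- ===== CLAIM (what is proved, stated in full; the proofs are below) =====
def Claim_equal_absolute_onset_beat_to_relative_onset_beat : Prop := ∀ (nmat : List (List Int)), Dom_absolute_onset_beat_to_relative_onset_beat nmat → Pre_absolute_onset_beat_to_relative_onset_beat nmat → Spec_absolute_onset_beat_to_relative_onset_beat nmat (absolute_onset_beat_to_relative_onset_beat nmat)

-- ===== LEMMAS AND PROOFS =====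

-- Inside a block (no index on the stretch hits a 400-boundary) A's loop is a plain map
-- with the carried start, then continues after the stretch.
theorem pvGoA_run (k : Nat) : ∀ (l : List (List Int)) (i : Nat) (s : Int),
    (∀ j, j < k → (i + j) % 400 ≠ 0) →
    pvGoA i s l = (l.take k).map (pvProcRow s) ++ pvGoA (i + k) s (l.drop k) := by
  induction k with
  | zero => intro l i s _; simp
  | succ k ih =>
    intro l i s h
    cases l with
    | nil => simp [pvGoA]
    | cons row rest =>
      have h0 : i % 400 ≠ 0 := by simpa using h 0 (by omega)
      have := ih rest (i + 1) s (fun j hj => by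
        have := h (j + 1) (by omega); omega)
      simp only [pvGoA, if_neg h0, this, List.take_succ_cons, List.drop_succ_cons,
        List.map_cons, List.cons_append, pvProcRow]
      rw [show i + (k + 1) = i + 1 + k from by omega]

theorem pvGoA_eq_pvGoB : ∀ (n : Nat) (l : List (List Int)) (i : Nat) (s : Int),
    l.length ≤ n → i % 400 = 0 → pvGoA i s l = pvGoB l := by
  intro n
  induction n with
  | zero => intro l i s hl _; cases l with
    | nil => rw [pvGoB.eq_def]; simp [pvGoA]
    | cons a b => simp at hl
  | succ n ih =>
    intro l i s hl hi
    cases l with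
    | nil => rw [pvGoB.eq_def]; simp [pvGoA]
    | cons row rest =>
      have run := pvGoA_run 399 rest (i + 1) ((PySem.List.pyGet? row 3).getD 0)
        (fun j hj => by omega)
      have hrec : pvGoA (i + 1 + 399) ((PySem.List.pyGet? row 3).getD 0) (rest.drop 399)
          = pvGoB (rest.drop 399) := by
        apply ih
        · have := List.length_drop (l := rest) (i := 399)
          simp at hl ⊢; omega
        · omega
      simp only [pvGoA, if_pos hi, run, hrec]
      conv_rhs => rw [pvGoB.eq_def]
      simp only [List.take_succ_cons, List.drop_succ_cons, List.map_cons, List.cons_append]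
      rfl

-- ===== VERDICT (by name: the statement is the Claim_ definition above) =====
theorem absolute_onset_beat_to_relative_onset_beat_spec : Claim_equal_absolute_onset_beat_to_relative_onset_beat := by
  intro nmat _ _
  show pvGoA 0 0 nmat = pvGoB nmat
  exact pvGoA_eq_pvGoB nmat.length nmat 0 0 le_rfl rfl
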